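-- pv_equiv track=rewrite | github.com/amari-calipso/UniV | algos/utils/utils.py | findMinMaxIndices
-- ===== SOURCE A (Python) =====
-- def findMinMaxIndices(array, a, b):
--     currMin = a
--     currMax = a
--     i = a+1
--     while i < b:
--         if array[i] < array[currMin]:
--             currMin = i
--         elif array[i] > array[currMax]:
--             currMax = i
--         i += 1
--     return currMin, currMax
-- ===== SOURCE B (Python) =====
-- def findMinMaxIndices(array, a, b):
--     currMin = a
--     i = a + 1
--     while i < b:
--         if array[i] < array[currMin]:
--             currMin = i
--         i += 1
--     currMax = a
--     i = a + 1
--     while i < b: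
--         if array[i] > array[currMax]:
--             currMax = i
--         i += 1
--     return currMin, currMax
-- ===== Notes on version B (the rewrite author's own statement) =====
-- stated objective: alternative
-- what changed: Replaces the single fused min/max loop (with its elif coupling the two updates) by two independent linear passes, one computing the min index and one the max index; correctness of the split rests on the invariant array[currMin] <= array[currMax].
import Mathlib
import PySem

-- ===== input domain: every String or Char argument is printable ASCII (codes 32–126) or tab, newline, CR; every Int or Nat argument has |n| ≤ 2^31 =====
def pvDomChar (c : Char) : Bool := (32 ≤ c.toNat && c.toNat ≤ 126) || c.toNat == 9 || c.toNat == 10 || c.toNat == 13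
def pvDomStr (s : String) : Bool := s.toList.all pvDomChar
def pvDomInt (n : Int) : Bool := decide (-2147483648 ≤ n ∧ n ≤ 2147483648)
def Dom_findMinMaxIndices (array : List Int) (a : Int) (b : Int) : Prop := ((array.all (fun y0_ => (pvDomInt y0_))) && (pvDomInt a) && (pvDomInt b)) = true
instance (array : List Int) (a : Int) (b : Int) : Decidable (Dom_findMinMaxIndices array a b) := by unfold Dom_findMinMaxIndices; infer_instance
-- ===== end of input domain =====

-- B replaces A's single fused min/max loop by two independent passes (min pass, then max pass); alternative decomposition, same cost.


-- shared index access: Python array[i] (negative-index wraparound); Pre_ guarantees every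
-- access is in range, so the getD default is never the value actually used on admitted inputs
def pvGet (array : List Int) (i : Int) : Int := (PySem.List.pyGet? array i).getD 0

-- ===== PORT A =====
-- A: one fused loop over i = a+1 .. b-1, state (currMin, currMax), elif chaining the updates
def findMinMaxIndices (array : List Int) (a : Int) (b : Int) : Int × Int :=
  (PySem.List.pyRange (a+1) b 1).foldl (fun s i =>
    if pvGet array i < pvGet array s.1 then (i, s.2)
    else if pvGet array i > pvGet array s.2 then (s.1, i)
    else s) (a, a)

-- ===== PORT B =====
-- B: two independent passes, one for the min index, one for the max index
def findMinMaxIndices_alt (array : List Int) (a : Int) (b : Int) : Int × Int :=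
  let currMin := (PySem.List.pyRange (a+1) b 1).foldl (fun m i =>
    if pvGet array i < pvGet array m then i else m) a
  let currMax := (PySem.List.pyRange (a+1) b 1).foldl (fun m i =>
    if pvGet array i > pvGet array m then i else m) a
  (currMin, currMax)

-- ===== PRECONDITION & SPEC =====
-- Pre_ excludes exactly the inputs on which Python A raises IndexError: whenever the loop
-- runs (b > a+1), every accessed index a .. b-1 must be a valid Python index of array.
def Pre_findMinMaxIndices (array : List Int) (a : Int) (b : Int) : Prop :=
  b ≤ a + 1 ∨ (-(array.length : Int) ≤ a ∧ b ≤ (array.length : Int))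
instance (array : List Int) (a : Int) (b : Int) : Decidable (Pre_findMinMaxIndices array a b) := by unfold Pre_findMinMaxIndices; infer_instance
def pvWitness_findMinMaxIndices : List Int × Int × Int := ([3, 1, 4, 1, 5], 0, 5)

def Spec_findMinMaxIndices (array : List Int) (a : Int) (b : Int) (out : Int × Int) : Prop := out = findMinMaxIndices_alt array a b
instance (array : List Int) (a : Int) (b : Int) (out : Int × Int) : Decidable (Spec_findMinMaxIndices array a b out) := by unfold Spec_findMinMaxIndices; infer_instance

-- ===== CLAIM (what is proved, stated in full; the proofs are below) =====
def Claim_equal_findMinMaxIndices : Prop := ∀ (array : List Int) (a : Int) (b : Int), Dom_findMinMaxIndices array a b → Pre_findMinMaxIndices array a b → Spec_findMinMaxIndices array a b (findMinMaxIndices array a b)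

-- ===== LEMMAS AND PROOFS =====

-- The fused fold equals the pair of independent folds, provided the state satisfies the
-- invariant array[currMin] ≤ array[currMax]; the invariant is preserved by every step.
theorem fused_eq_split (array : List Int) (l : List Int) :
    ∀ m M : Int, pvGet array m ≤ pvGet array M →
    l.foldl (fun s i =>
      if pvGet array i < pvGet array s.1 then (i, s.2)
      else if pvGet array i > pvGet array s.2 then (s.1, i)
      else s) (m, M)
    = (l.foldl (fun m i => if pvGet array i < pvGet array m then i else m) m,
       l.foldl (fun m i => if pvGet array i > pvGet array m then i else m) M) := by
  induction l with
  | nil => intro m M _; rfl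
  | cons x xs ih =>
    intro m M h
    simp only [List.foldl_cons]
    by_cases h1 : pvGet array x < pvGet array m
    · have h2 : ¬ pvGet array x > pvGet array M := by omega
      simp only [if_pos h1, if_neg h2]
      exact ih x M (by omega)
    · simp only [if_neg h1]
      by_cases h2 : pvGet array x > pvGet array M
      · simp only [if_pos h2]
        exact ih m x (by omega)
      · simp only [if_neg h2]
        exact ih m M h

-- ===== VERDICT (by name: the statement is the Claim_ definition above) =====
theorem findMinMaxIndices_spec : Claim_equal_findMinMaxIndices := by
  intro array a b _ _
  unfold Spec_findMinMaxIndices findMinMaxIndices findMinMaxIndices_alt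
  exact fused_eq_split array _ a a le_rfl
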